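-- pv_equiv track=rewrite | github.com/LeeGukgeon/LeeGukgeon | codingtest/15388.py | isrunortri
-- ===== SOURCE A (Python) =====
-- def isrunortri(lst):
--     N=len(lst)
--     lst.sort()
--     for i in range(N-2):
--         for j in range(i+1,N-1):
--             for k in range(j+1,N):
--                 if lst[i]==lst[j] and lst[j]==lst[k]:
--                     return True
--                 if lst[i]+1==lst[j] and lst[j]+1==lst[k]:
--                     return True
--     return False
-- ===== SOURCE B (Python) =====
-- def isrunortri(lst):
--     # Return-value equivalent to A; unlike A it does not sort lst in place.
--     counts = {}
--     for x in lst: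
--         counts[x] = counts.get(x, 0) + 1
--     for v, c in counts.items():
--         if c >= 3 or (v + 1 in counts and v + 2 in counts):
--             return True
--     return False
-- ===== Notes on version B (the rewrite author's own statement) =====
-- stated objective: faster
-- what changed: Replaced sort + O(n^3) triple-nested index scan by a single counting pass into a dict followed by a per-distinct-value check (count >= 3, or value, value+1, value+2 all present); B does not mutate lst (A sorts it in place), return values are identical.
import Mathlib
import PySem

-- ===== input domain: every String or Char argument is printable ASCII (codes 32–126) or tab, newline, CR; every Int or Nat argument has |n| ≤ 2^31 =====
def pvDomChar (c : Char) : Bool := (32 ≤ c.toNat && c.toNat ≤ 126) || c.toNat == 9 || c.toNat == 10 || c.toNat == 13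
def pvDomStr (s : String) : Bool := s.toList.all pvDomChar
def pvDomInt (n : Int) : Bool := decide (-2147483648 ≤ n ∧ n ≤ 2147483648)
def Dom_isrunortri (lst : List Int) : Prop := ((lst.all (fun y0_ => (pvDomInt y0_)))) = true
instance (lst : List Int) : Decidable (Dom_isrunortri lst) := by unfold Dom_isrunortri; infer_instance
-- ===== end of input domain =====

-- B replaces A's sort + O(n^3) triple index scan by one counting pass and a per-distinct-value
-- check (faster); equivalence is about the RETURN value only: A sorts lst in place, B does not mutate it.

-- ===== PORT A =====
def isrunortri (lst : List Int) : Bool :=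
  let N : Int := lst.length
  let s := PySem.List.sorted lst (fun x => x) false   -- lst.sort()
  (PySem.List.pyRange 0 (N-2) 1).any (fun i =>
    (PySem.List.pyRange (i+1) (N-1) 1).any (fun j =>
      (PySem.List.pyRange (j+1) N 1).any (fun k =>
        (PySem.List.pyGetD s i 0 == PySem.List.pyGetD s j 0 && PySem.List.pyGetD s j 0 == PySem.List.pyGetD s k 0)
        || (PySem.List.pyGetD s i 0 + 1 == PySem.List.pyGetD s j 0 && PySem.List.pyGetD s j 0 + 1 == PySem.List.pyGetD s k 0))))

-- ===== PORT B =====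
def isrunortri_alt (lst : List Int) : Bool :=
  let counts : PySem.Dict Int Int := lst.foldl (fun d x => d.insert x (d.getD x 0 + 1)) PySem.Dict.empty
  counts.items.any (fun p => decide (3 ≤ p.2) || (counts.contains (p.1 + 1) && counts.contains (p.1 + 2)))

-- ===== PRECONDITION & SPEC =====
def Spec_isrunortri (lst : List Int) (out : Bool) : Prop := out = isrunortri_alt lst
instance (lst : List Int) (out : Bool) : Decidable (Spec_isrunortri lst out) := by unfold Spec_isrunortri; infer_instance

-- ===== CLAIM (what is proved, stated in full; the proofs are below) =====
def Claim_equal_isrunortri : Prop := ∀ (lst : List Int), Dom_isrunortri lst → Spec_isrunortri lst (isrunortri lst)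

-- ===== LEMMAS AND PROOFS =====

-- the common characterization: some value occurs ≥ 3 times, or v, v+1, v+2 all occur
def hasTriple (lst : List Int) : Prop :=
  ∃ v ∈ lst, 3 ≤ lst.count v ∨ ((v+1) ∈ lst ∧ (v+2) ∈ lst)

-- three strictly increasing positions holding v ⟹ count ≥ 3 (and the 2-position version)
theorem two_le_count_of_indices (s : List Int) (v : Int) (i j : Nat)
    (hij : i < j) (h1 : s[i]? = some v) (h2 : s[j]? = some v) : 2 ≤ s.count v := by
  induction s generalizing i j with
  | nil => simp at h1
  | cons x t ih =>
    cases i with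
    | zero =>
      obtain ⟨j', rfl⟩ : ∃ j', j = j' + 1 := ⟨j - 1, by omega⟩
      simp only [List.getElem?_cons_zero, Option.some.injEq] at h1
      simp only [List.getElem?_cons_succ] at h2
      have h4 : 1 ≤ t.count v := List.count_pos_iff.mpr (List.mem_of_getElem? h2)
      subst h1; rw [List.count_cons_self]; omega
    | succ i' =>
      obtain ⟨j', rfl⟩ : ∃ j', j = j' + 1 := ⟨j - 1, by omega⟩
      simp only [List.getElem?_cons_succ] at h1 h2
      have := ih i' j' (by omega) h1 h2
      rw [List.count_cons]; omega

theorem three_le_count_of_indices (s : List Int) (v : Int) (i j k : Nat)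
    (hij : i < j) (hjk : j < k) (h1 : s[i]? = some v) (h2 : s[j]? = some v)
    (h3 : s[k]? = some v) : 3 ≤ s.count v := by
  induction s generalizing i j k with
  | nil => simp at h1
  | cons x t ih =>
    obtain ⟨k', rfl⟩ : ∃ k', k = k' + 1 := ⟨k - 1, by omega⟩
    simp only [List.getElem?_cons_succ] at h3
    cases i with
    | zero =>
      obtain ⟨j', rfl⟩ : ∃ j', j = j' + 1 := ⟨j - 1, by omega⟩
      simp only [List.getElem?_cons_zero, Option.some.injEq] at h1
      simp only [List.getElem?_cons_succ] at h2
      have := two_le_count_of_indices t v j' k' (by omega) h2 h3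
      subst h1; rw [List.count_cons_self]; omega
    | succ i' =>
      obtain ⟨j', rfl⟩ : ∃ j', j = j' + 1 := ⟨j - 1, by omega⟩
      simp only [List.getElem?_cons_succ] at h1 h2
      have := ih i' j' k' (by omega) (by omega) h1 h2 h3
      rw [List.count_cons]; omega

-- count ≥ 2 / ≥ 3 ⟹ strictly increasing positions holding v
theorem indices_of_two_le_count (s : List Int) (v : Int) (h : 2 ≤ s.count v) :
    ∃ i j : Nat, i < j ∧ s[i]? = some v ∧ s[j]? = some v := by
  induction s with
  | nil => simp at h
  | cons x t ih =>
    by_cases hx : x = v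
    · subst hx
      have h1 : 1 ≤ t.count x := by rw [List.count_cons_self] at h; omega
      have hm : x ∈ t := List.count_pos_iff.mp (by omega : 0 < t.count x)
      obtain ⟨j, hj⟩ := List.getElem?_of_mem hm
      exact ⟨0, j + 1, by omega, by simp, by simpa using hj⟩
    · have : 2 ≤ t.count v := by rw [List.count_cons] at h; simp [hx] at h; omega
      obtain ⟨i, j, hij, h1, h2⟩ := ih this
      exact ⟨i + 1, j + 1, by omega, by simpa using h1, by simpa using h2⟩

theorem indices_of_three_le_count (s : List Int) (v : Int) (h : 3 ≤ s.count v) :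
    ∃ i j k : Nat, i < j ∧ j < k ∧ s[i]? = some v ∧ s[j]? = some v ∧ s[k]? = some v := by
  induction s with
  | nil => simp at h
  | cons x t ih =>
    by_cases hx : x = v
    · subst hx
      have h2 : 2 ≤ t.count x := by rw [List.count_cons_self] at h; omega
      obtain ⟨j, k, hjk, hj, hk⟩ := indices_of_two_le_count t x h2
      exact ⟨0, j + 1, k + 1, by omega, by omega, by simp, by simpa using hj, by simpa using hk⟩
    · have : 3 ≤ t.count v := by rw [List.count_cons] at h; simp [hx] at h; omega
      obtain ⟨i, j, k, hij, hjk, h1, h2, h3⟩ := ih this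
      exact ⟨i + 1, j + 1, k + 1, by omega, by omega, by simpa using h1, by simpa using h2,
        by simpa using h3⟩

theorem b_iff (lst : List Int) : isrunortri_alt lst = true ↔ hasTriple lst := by
  simp only [isrunortri_alt, hasTriple, PySem.Dict.foldl_insert_getD_add_one_eq_counter,
    PySem.Dict.items_counter, List.any_map, List.any_eq_true, PySem.Dict.contains_counter,
    Function.comp, Bool.or_eq_true, Bool.and_eq_true, decide_eq_true_eq, List.contains_eq_mem,
    PySem.Set.mem_ofList]
  constructor
  · rintro ⟨v, hv, h⟩
    refine ⟨v, hv, ?_⟩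
    rcases h with h | h
    · left; exact_mod_cast h
    · right; exact h
  · rintro ⟨v, hv, h⟩
    refine ⟨v, hv, ?_⟩
    rcases h with h | h
    · left; exact_mod_cast h
    · right; exact h

theorem a_iff (lst : List Int) : isrunortri lst = true ↔ hasTriple lst := by
  have hlen : (PySem.List.sorted lst (fun x => x) false).length = lst.length :=
    PySem.List.length_sorted lst _ _
  have hperm : (PySem.List.sorted lst (fun x => x) false).Perm lst :=
    PySem.List.sorted_perm lst _ _
  simp only [isrunortri, List.any_eq_true, PySem.List.mem_pyRange_one, Bool.or_eq_true,
    Bool.and_eq_true, beq_iff_eq]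
  constructor
  · rintro ⟨i, ⟨hi0, hi2⟩, j, ⟨hj1, hj2⟩, k, ⟨hk1, hk2⟩, hcond⟩
    rw [PySem.List.pyGetD_eq_getElem _ 0 (by omega) (by omega),
        PySem.List.pyGetD_eq_getElem _ 0 (by omega) (by omega),
        PySem.List.pyGetD_eq_getElem _ 0 (by omega) (by omega)] at hcond
    have hij : i.toNat < j.toNat := by omega
    have hjk : j.toNat < k.toNat := by omega
    have hkn : k.toNat < (PySem.List.sorted lst (fun x => x) false).length := by omega
    have hmem : (PySem.List.sorted lst (fun x => x) false)[i.toNat]'(by omega) ∈ lst :=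
      hperm.mem_iff.mp (List.getElem_mem _)
    rcases hcond with ⟨h1, h2⟩ | ⟨h1, h2⟩
    · -- three equal values: count ≥ 3
      refine ⟨_, hmem, Or.inl ?_⟩
      have h3 : 3 ≤ (PySem.List.sorted lst (fun x => x) false).count
          ((PySem.List.sorted lst (fun x => x) false)[i.toNat]'(by omega)) := by
        apply three_le_count_of_indices _ _ i.toNat j.toNat k.toNat hij hjk
        · exact List.getElem?_eq_some_iff.mpr ⟨by omega, rfl⟩
        · exact List.getElem?_eq_some_iff.mpr ⟨by omega, h1.symm⟩
        · exact List.getElem?_eq_some_iff.mpr ⟨by omega, by omega⟩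
      rwa [hperm.count_eq] at h3
    · -- a run v, v+1, v+2
      refine ⟨_, hmem, Or.inr ⟨?_, ?_⟩⟩
      · rw [h1]
        exact hperm.mem_iff.mp (List.getElem_mem _)
      · have heq : (PySem.List.sorted lst (fun x => x) false)[i.toNat]'(by omega) + 2 =
            (PySem.List.sorted lst (fun x => x) false)[k.toNat]'hkn := by omega
        rw [heq]
        exact hperm.mem_iff.mp (List.getElem_mem _)
  · rintro ⟨v, hv, h3 | ⟨h1, h2⟩⟩
    · -- count ≥ 3 in lst, hence in the sorted copy; pick three positions
      have hc : 3 ≤ (PySem.List.sorted lst (fun x => x) false).count v := by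
        rwa [hperm.count_eq]
      obtain ⟨ni, nj, nk, hij, hjk, hgi, hgj, hgk⟩ := indices_of_three_le_count _ v hc
      obtain ⟨hiN, hiv⟩ := List.getElem?_eq_some_iff.mp hgi
      obtain ⟨hjN, hjv⟩ := List.getElem?_eq_some_iff.mp hgj
      obtain ⟨hkN, hkv⟩ := List.getElem?_eq_some_iff.mp hgk
      refine ⟨(ni : Int), ⟨by omega, by omega⟩, (nj : Int), ⟨by omega, by omega⟩,
        (nk : Int), ⟨by omega, by omega⟩, ?_⟩
      rw [PySem.List.pyGetD_eq_getElem _ 0 (by omega) (by omega),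
          PySem.List.pyGetD_eq_getElem _ 0 (by omega) (by omega),
          PySem.List.pyGetD_eq_getElem _ 0 (by omega) (by omega)]
      simp only [Int.toNat_natCast]
      exact Or.inl ⟨by rw [hiv, hjv], by rw [hjv, hkv]⟩
    · -- v, v+1, v+2 all occur: their positions are strictly increasing since it is sorted
      obtain ⟨ni, hgi⟩ := List.getElem?_of_mem ((PySem.List.mem_sorted lst (fun x => x) false v).mpr hv)
      obtain ⟨nj, hgj⟩ := List.getElem?_of_mem ((PySem.List.mem_sorted lst (fun x => x) false (v+1)).mpr h1)
      obtain ⟨nk, hgk⟩ := List.getElem?_of_mem ((PySem.List.mem_sorted lst (fun x => x) false (v+2)).mpr h2)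
      obtain ⟨hiN, hiv⟩ := List.getElem?_eq_some_iff.mp hgi
      obtain ⟨hjN, hjv⟩ := List.getElem?_eq_some_iff.mp hgj
      obtain ⟨hkN, hkv⟩ := List.getElem?_eq_some_iff.mp hgk
      have hij : ni < nj := by
        by_contra hle
        have hmono := PySem.List.sorted_id_getElem_mono lst (p := nj) (q := ni)
          (by omega) (by omega)
        omega
      have hjk : nj < nk := by
        by_contra hle
        have hmono := PySem.List.sorted_id_getElem_mono lst (p := nk) (q := nj)
          (by omega) (by omega)
        omega
      refine ⟨(ni : Int), ⟨by omega, by omega⟩, (nj : Int), ⟨by omega, by omega⟩,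
        (nk : Int), ⟨by omega, by omega⟩, ?_⟩
      rw [PySem.List.pyGetD_eq_getElem _ 0 (by omega) (by omega),
          PySem.List.pyGetD_eq_getElem _ 0 (by omega) (by omega),
          PySem.List.pyGetD_eq_getElem _ 0 (by omega) (by omega)]
      simp only [Int.toNat_natCast]
      exact Or.inr ⟨by omega, by omega⟩

-- ===== VERDICT (by name: the statement is the Claim_ definition above) =====
theorem isrunortri_spec : Claim_equal_isrunortri := by
  intro lst _
  unfold Spec_isrunortri
  have := (a_iff lst).trans (b_iff lst).symm
  rcases hA : isrunortri lst with _ | _ <;> rcases hB : isrunortri_alt lst with _ | _ <;>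
    simp_all
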